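-- pv_equiv track=rewrite | github.com/yunzhuz/code-offer | 61.py | solution
-- ===== SOURCE A (Python) =====
-- def solution(l):
--     l.sort()
--     n = 0
--     for i in l:
--         if i == 0:
--             n += 1
--     index = n
--     gap = 0
--     while index < len(l)-1:
--         if l[index] == l[index + 1]:
--             return False
--         gap += l[index+1] - l[index] - 1
--         index += 1
--     if gap > n:
--         return False
--     else:
--         return True
-- ===== SOURCE B (Python) =====
-- def solution(l):
--     zeros = 0
--     seen = set()
--     mn = None
--     mx = None
--     for x in l:
--         if x == 0:
--             zeros += 1
--         else:
--             if x in seen: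
--                 return False
--             seen.add(x)
--             if mn is None or x < mn:
--                 mn = x
--             if mx is None or x > mx:
--                 mx = x
--     if mn is None:
--         return True
--     return mx - mn - (len(seen) - 1) <= zeros
-- ===== Notes on version B (the rewrite author's own statement) =====
-- stated objective: faster
-- what changed: A sorts the list in place and scans adjacent pairs of the sorted suffix accumulating gaps; B never sorts: one unsorted pass keeps a zero counter, a hash set of seen nonzero cards (early False on a repeat) and running min/max, then checks max - min - (distinct nonzeros - 1) <= zeros.
-- outside the precondition, e.g. on solution([-1, 0, 2]): A returns True, B returns False
import Mathlib
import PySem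

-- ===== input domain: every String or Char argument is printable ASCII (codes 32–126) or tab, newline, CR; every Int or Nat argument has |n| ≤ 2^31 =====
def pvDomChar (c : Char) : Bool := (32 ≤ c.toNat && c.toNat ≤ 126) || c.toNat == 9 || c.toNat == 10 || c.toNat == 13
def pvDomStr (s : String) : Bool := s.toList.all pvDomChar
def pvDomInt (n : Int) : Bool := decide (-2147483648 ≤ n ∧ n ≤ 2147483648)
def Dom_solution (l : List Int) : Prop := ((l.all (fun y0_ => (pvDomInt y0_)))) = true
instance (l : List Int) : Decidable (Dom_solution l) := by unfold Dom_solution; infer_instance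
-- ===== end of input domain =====

-- B replaces A's sort-then-scan by a single unsorted pass (duplicate set, min/max, zero count);
-- objective: faster (O(n) vs O(n log n)). Note: Python A sorts l IN PLACE (caller-visible
-- mutation); B does not mutate l — the equivalence proved here is about the return value.

-- ===== PORT A =====
-- the while loop of A: state (index, gap), early `return False` on equal neighbours
def solutionLoop (s : List Int) (n index gap : Int) : Bool :=
  if h : index < (s.length : Int) - 1 then
    if PySem.List.pyGetD s index 0 = PySem.List.pyGetD s (index + 1) 0 then false
    else solutionLoop s n (index + 1)
           (gap + (PySem.List.pyGetD s (index + 1) 0 - PySem.List.pyGetD s index 0 - 1))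
  else if gap > n then false else true
termination_by ((s.length : Int) - 1 - index).toNat
decreasing_by omega

def solution (l : List Int) : Bool :=
  let s := PySem.List.sorted l (fun x => x)
  let n := s.foldl (fun n i => if i = 0 then n + 1 else n) (0 : Int)
  solutionLoop s n n 0

-- ===== PORT B =====
-- the terminal `if mn is None … return mx - mn - (len(seen)-1) <= zeros` of B
-- (in Python mn and mx are None simultaneously, so the `some a, none` case never arises)
def altTerm (zeros : Int) (seen : PySem.Set Int) (mn mx : Option Int) : Bool :=
  match mn, mx with
  | some a, some b => decide (b - a - ((seen.length : Int) - 1) ≤ zeros)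
  | _, _ => true

-- `if mn is None or x < mn: mn = x`
def omin (o : Option Int) (x : Int) : Option Int :=
  some (match o with | none => x | some m => if x < m then x else m)

-- `if mx is None or x > mx: mx = x`
def omax (o : Option Int) (x : Int) : Option Int :=
  some (match o with | none => x | some m => if x > m then x else m)

-- B's single for-loop, with early `return False` on a repeated nonzero card
def altLoop : List Int → Int → PySem.Set Int → Option Int → Option Int → Bool
  | [], zeros, seen, mn, mx => altTerm zeros seen mn mx
  | x :: rest, zeros, seen, mn, mx =>
    if x = 0 then altLoop rest (zeros + 1) seen mn mx
    else if PySem.Set.contains seen x then false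
    else altLoop rest zeros (PySem.Set.add seen x) (omin mn x) (omax mx x)

def solution_alt (l : List Int) : Bool :=
  altLoop l 0 PySem.Set.empty none none

-- ===== PRECONDITION & SPEC =====
-- Pre_ excludes lists that contain both a joker (0) and a negative value: no card semantics is
-- specified for negative cards, and there A's drop-the-n-smallest-after-sort and B's
-- zeros-are-wild reading are two equally defensible accidental choices.
def Pre_solution (l : List Int) : Prop := 0 ∉ l ∨ ∀ x ∈ l, 0 ≤ x
instance (l : List Int) : Decidable (Pre_solution l) := by unfold Pre_solution; infer_instance
def pvWitness_solution : List Int := [3, 0, 1]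

def Spec_solution (l : List Int) (out : Bool) : Prop := out = solution_alt l
instance (l : List Int) (out : Bool) : Decidable (Spec_solution l out) := by unfold Spec_solution; infer_instance

-- ===== CLAIM (what is proved, stated in full; the proofs are below) =====
def Claim_equal_solution : Prop := ∀ (l : List Int), Dom_solution l → Pre_solution l → Spec_solution l (solution l)

-- ===== LEMMAS AND PROOFS =====

-- A's while loop, re-expressed structurally over the remaining suffix of the sorted list
def chk : List Int → Int → Int → Bool
  | [], n, g => if g > n then false else true
  | [_], n, g => if g > n then false else true
  | a :: b :: r, n, g => if a = b then false else chk (b :: r) n (g + (b - a - 1))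

theorem loop_eq_chk (s : List Int) (n : Int) (i g : Int) (h0 : 0 ≤ i) :
    solutionLoop s n i g = chk (s.drop i.toNat) n g := by
  rw [solutionLoop]
  by_cases h : i < (s.length : Int) - 1
  · have hk1 : i.toNat < s.length := by omega
    have hk2 : i.toNat + 1 < s.length := by omega
    have hdrop : s.drop i.toNat = s[i.toNat] :: s[i.toNat + 1] :: s.drop (i.toNat + 2) := by
      rw [List.drop_eq_getElem_cons hk1, List.drop_eq_getElem_cons hk2]
    rw [PySem.List.pyGetD_eq_getElem s 0 h0 (by omega),
        PySem.List.pyGetD_eq_getElem s 0 (by omega) (by omega)]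
    have hi1 : (i + 1).toNat = i.toNat + 1 := by omega
    simp only [hi1, h, dif_pos, hdrop, chk]
    rw [loop_eq_chk s n (i + 1) _ (by omega)]
    simp only [hi1]
    rw [List.drop_eq_getElem_cons (l := s) (i := i.toNat + 1) hk2]
  · simp only [h, dif_neg, not_false_iff]
    match hd : s.drop i.toNat with
    | [] => simp [chk]
    | [a] => simp [chk]
    | a :: b :: r =>
      exfalso
      have := congrArg List.length hd
      simp [List.length_drop] at this
      omega
termination_by ((s.length : Int) - 1 - i).toNat
decreasing_by omega

theorem chk_sorted (t : List Int) (a n g : Int) (hp : (a :: t).Pairwise (· ≤ ·)) :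
    chk (a :: t) n g =
      if (a :: t).Nodup then
        decide (g + ((a :: t).getLastD 0 - a - (t.length : Int)) ≤ n)
      else false := by
  induction t generalizing a g with
  | nil =>
    simp only [chk, List.getLastD, List.length_nil, List.nodup_cons, List.not_mem_nil,
      not_false_iff, List.nodup_nil, and_self, if_true]
    by_cases hg : g > n <;> simp [hg]; omega
  | cons b r ih =>
    have hab : a ≤ b := (List.pairwise_cons.mp hp).1 b (List.mem_cons_self)
    by_cases he : a = b
    · have : ¬ (a :: b :: r).Nodup := by
        subst he; simp [List.nodup_cons]
      simp [chk, he]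
    · have hlt : a < b := lt_of_le_of_ne hab he
      have hp' : (b :: r).Pairwise (· ≤ ·) := (List.pairwise_cons.mp hp).2
      have hnotmem : a ∉ b :: r := by
        intro hm
        rcases List.mem_cons.mp hm with h1 | h2
        · exact he h1
        · have := (List.pairwise_cons.mp hp').1 a h2
          omega
      have hnd : (a :: b :: r).Nodup ↔ (b :: r).Nodup := by
        simp [List.nodup_cons, hnotmem]
      simp only [chk, he, ih b _ hp', hnd]
      by_cases h2 : (b :: r).Nodup
      · simp only [h2, if_true]
        have hlast : (a :: b :: r).getLastD 0 = (b :: r).getLastD 0 := by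
          simp [List.getLastD]
        rw [hlast]
        have : g + (b - a - 1) + ((b :: r).getLastD 0 - b - (r.length : Int)) =
            g + ((b :: r).getLastD 0 - a - (((b :: r).length : Int))) := by
          simp [List.length_cons]; ring
        rw [this]
        simp
      · simp [h2]

-- the nonzero cards of l, in order
def nzl (l : List Int) : List Int := l.filter (fun x => !(x == 0))

-- compositional spec of B's loop
theorem altLoop_eq (l : List Int) (z : Int) (s : PySem.Set Int) (mn mx : Option Int) :
    altLoop l z s mn mx =
      if (nzl l).Nodup ∧ ∀ x ∈ nzl l, x ∉ s then
        altTerm (z + (l.count 0 : Int)) ((nzl l).foldl PySem.Set.add s)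
          ((nzl l).foldl omin mn) ((nzl l).foldl omax mx)
      else false := by
  induction l generalizing z s mn mx with
  | nil => simp [altLoop, nzl]
  | cons x r ih =>
    by_cases hx : x = 0
    · subst hx
      have hnz : nzl (0 :: r) = nzl r := by simp [nzl]
      have hz : z + 1 + (r.count 0 : Int) = z + ((r.count 0 + 1 : Nat) : Int) := by
        push_cast; ring
      simp only [altLoop, ih, hnz, List.count_cons_self, if_true, hz]
    · have hnz : nzl (x :: r) = x :: nzl r := by simp [nzl, hx]
      by_cases hm : x ∈ s
      · have hc : PySem.Set.contains s x = true := (PySem.Set.contains_iff s x).mpr hm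
        rw [altLoop, if_neg hx, hc, if_pos rfl]
        rw [if_neg]
        rintro ⟨-, hall⟩
        exact hall x (by rw [hnz]; exact List.mem_cons_self) hm
      · have hc : ¬ PySem.Set.contains s x = true := by
          simp [PySem.Set.contains_eq_listContains, hm]
        rw [altLoop, if_neg hx, if_neg hc, ih]
        have hcond : ((nzl r).Nodup ∧ ∀ y ∈ nzl r, y ∉ PySem.Set.add s x) ↔
            ((nzl (x :: r)).Nodup ∧ ∀ y ∈ nzl (x :: r), y ∉ s) := by
          rw [hnz]
          constructor
          · rintro ⟨hnd, hall⟩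
            have hxnot : x ∉ nzl r := by
              intro hmem
              exact hall x hmem ((PySem.Set.mem_add s x x).mpr (Or.inr rfl))
            refine ⟨List.nodup_cons.mpr ⟨hxnot, hnd⟩, ?_⟩
            intro y hy
            rcases List.mem_cons.mp hy with h1 | h2
            · subst h1; exact hm
            · intro hys
              exact hall y h2 ((PySem.Set.mem_add s x y).mpr (Or.inl hys))
          · rintro ⟨hnd, hall⟩
            obtain ⟨hxnot, hnd'⟩ := List.nodup_cons.mp hnd
            refine ⟨hnd', ?_⟩
            intro y hy hya
            rcases (PySem.Set.mem_add s x y).mp hya with h1 | h2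
            · exact hall y (List.mem_cons_of_mem _ hy) h1
            · subst h2; exact hxnot hy
        rw [if_congr hcond rfl rfl]
        have hcnt : ((x :: r).count 0 : Int) = (r.count 0 : Int) := by
          rw [List.count_cons_of_ne (by omega)]
        rw [hnz]
        simp only [List.foldl_cons, hcnt]

theorem foldl_omin_some (d : List Int) (m : Int) :
    d.foldl omin (some m) = some (d.foldl min m) := by
  induction d generalizing m with
  | nil => rfl
  | cons e d ih =>
    simp only [List.foldl_cons]
    have h1 : omin (some m) e = some (min m e) := by
      simp only [omin]; congr 1; rw [min_def]; split_ifs <;> omega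
    rw [h1, ih]

theorem foldl_omax_some (d : List Int) (m : Int) :
    d.foldl omax (some m) = some (d.foldl max m) := by
  induction d generalizing m with
  | nil => rfl
  | cons e d ih =>
    simp only [List.foldl_cons]
    have h1 : omax (some m) e = some (max m e) := by
      simp only [omax]; congr 1; rw [max_def]; split_ifs <;> omega
    rw [h1, ih]

theorem foldl_min_le (c : Int) (d : List Int) : ∀ y ∈ c :: d, d.foldl min c ≤ y := by
  induction d generalizing c with
  | nil =>
    intro y hy
    rw [List.mem_singleton] at hy
    subst hy
    exact le_refl _
  | cons e d ih =>
    intro y hy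
    have base : d.foldl min (min c e) ≤ min c e := ih (min c e) (min c e) List.mem_cons_self
    rcases List.mem_cons.mp hy with h | h
    · subst h; exact le_trans base (min_le_left _ _)
    rcases List.mem_cons.mp h with h1 | h2
    · subst h1; exact le_trans base (min_le_right _ _)
    · exact ih (min c e) y (List.mem_cons_of_mem _ h2)

theorem foldl_min_mem (c : Int) (d : List Int) : d.foldl min c ∈ c :: d := by
  induction d generalizing c with
  | nil => exact List.mem_cons_self
  | cons e d ih =>
    have := ih (min c e)
    rcases List.mem_cons.mp this with h | h
    · rcases min_choice c e with hc | hc <;> rw [List.foldl_cons]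
      · rw [h, hc]; exact List.mem_cons_self
      · rw [h, hc]; exact List.mem_cons_of_mem _ List.mem_cons_self
    · exact List.mem_cons_of_mem _ (List.mem_cons_of_mem _ h)

theorem foldl_max_ge (c : Int) (d : List Int) : ∀ y ∈ c :: d, y ≤ d.foldl max c := by
  induction d generalizing c with
  | nil =>
    intro y hy
    rw [List.mem_singleton] at hy
    subst hy
    exact le_refl _
  | cons e d ih =>
    intro y hy
    have base : max c e ≤ d.foldl max (max c e) := ih (max c e) (max c e) List.mem_cons_self
    rcases List.mem_cons.mp hy with h | h
    · subst h; exact le_trans (le_max_left _ _) base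
    rcases List.mem_cons.mp h with h1 | h2
    · subst h1; exact le_trans (le_max_right _ _) base
    · exact ih (max c e) y (List.mem_cons_of_mem _ h2)

theorem foldl_max_mem (c : Int) (d : List Int) : d.foldl max c ∈ c :: d := by
  induction d generalizing c with
  | nil => exact List.mem_cons_self
  | cons e d ih =>
    have := ih (max c e)
    rcases List.mem_cons.mp this with h | h
    · rcases max_choice c e with hc | hc <;> rw [List.foldl_cons]
      · rw [h, hc]; exact List.mem_cons_self
      · rw [h, hc]; exact List.mem_cons_of_mem _ List.mem_cons_self
    · exact List.mem_cons_of_mem _ (List.mem_cons_of_mem _ h)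

-- last element of a ≤-sorted nonempty list bounds every element
theorem pairwise_le_getLastD (t : List Int) (a : Int) (hp : (a :: t).Pairwise (· ≤ ·)) :
    ∀ y ∈ a :: t, y ≤ (a :: t).getLastD 0 := by
  induction t generalizing a with
  | nil => intro y hy; simp at hy; simp [hy, List.getLastD]
  | cons b r ih =>
    intro y hy
    have hp' : (b :: r).Pairwise (· ≤ ·) := (List.pairwise_cons.mp hp).2
    have hlast : (a :: b :: r).getLastD 0 = (b :: r).getLastD 0 := by simp [List.getLastD]
    rw [hlast]
    rcases List.mem_cons.mp hy with h | h
    · subst h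
      have hab : y ≤ b := (List.pairwise_cons.mp hp).1 b List.mem_cons_self
      exact le_trans hab (ih b hp' b List.mem_cons_self)
    · exact ih b hp' y h

-- a set built from a duplicate-free list has the list's length
theorem ofList_length_nodup (t : List Int) (h : t.Nodup) :
    (PySem.Set.ofList t).length = t.length := by
  exact ((List.perm_ext_iff_of_nodup (PySem.Set.nodup_ofList t) h).mpr
      (fun a => by simp [PySem.Set.mem_ofList])).length_eq

-- dropping count-of-zero elements of a sorted nonnegative list removes exactly the zeros
theorem drop_count_sorted (s : List Int) (hp : s.Pairwise (· ≤ ·)) (hn : ∀ x ∈ s, 0 ≤ x) :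
    s.drop (s.count 0) = nzl s := by
  induction s with
  | nil => rfl
  | cons x r ih =>
    have hp' : r.Pairwise (· ≤ ·) := (List.pairwise_cons.mp hp).2
    have hn' : ∀ y ∈ r, 0 ≤ y := fun y hy => hn y (List.mem_cons_of_mem _ hy)
    by_cases hx : x = 0
    · subst hx
      rw [List.count_cons_self, nzl]
      simp only [List.filter_cons]
      norm_num
      rw [ih hp' hn', nzl]
    · have hxpos : 0 < x := lt_of_le_of_ne (hn x List.mem_cons_self) (Ne.symm hx)
      have hrz : ∀ y ∈ r, y ≠ 0 := by
        intro y hy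
        have := (List.pairwise_cons.mp hp).1 y hy
        omega
      have hc : (x :: r).count 0 = 0 := by
        rw [List.count_eq_zero]
        intro hmem
        rcases List.mem_cons.mp hmem with h | h
        · exact hx h.symm
        · exact hrz 0 h rfl
      rw [hc, List.drop_zero, nzl, List.filter_eq_self.mpr]
      intro y hy
      rcases List.mem_cons.mp hy with h | h
      · simp [h, hx]
      · simp [hrz y h]

theorem solution_eq (l : List Int) (hpre : Pre_solution l) : solution l = solution_alt l := by
  simp only [solution, solution_alt]
  have hcount : ∀ s : List Int,
      s.foldl (fun n i => if i = 0 then n + 1 else n) (0 : Int)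
        = ((PySem.List.count s 0 : Nat) : Int) := by
    intro s
    rw [show (fun (n i : Int) => if i = 0 then n + 1 else n)
        = (fun (acc : Int) (x : Int) => if ((x == 0) : Bool) = true then acc + 1 else acc) from by
      funext n i; simp]
    rw [PySem.List.foldl_count_if]
    simp [PySem.List.count_eq, List.count_eq_countP]
  set s := PySem.List.sorted l (fun x => x) with hs
  have hperm : s.Perm l := PySem.List.sorted_perm l (fun x => x) false
  have hpair : s.Pairwise (· ≤ ·) := PySem.List.sorted_pairwise l (fun x => x)
  rw [hcount s]
  have hcnt : PySem.List.count s 0 = l.count 0 := by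
    simp [PySem.List.count_eq, hperm.count_eq]
  set n : Int := ((PySem.List.count s 0 : Nat) : Int) with hndef
  have hn : (0 : Int) ≤ n := Int.natCast_nonneg _
  rw [loop_eq_chk s n n 0 hn]
  have hton : n.toNat = s.count 0 := by
    simp [hndef, PySem.List.count_eq]
  -- the suffix A scans is a permutation of the nonzero cards
  have hdperm : (s.drop n.toNat).Perm (nzl l) := by
    rcases hpre with h0 | hnonneg
    · have hc0 : l.count 0 = 0 := List.count_eq_zero.mpr h0
      have : n.toNat = 0 := by rw [hton, hperm.count_eq, hc0]
      rw [this, List.drop_zero]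
      have : nzl l = l := by
        rw [nzl, List.filter_eq_self.mpr]
        intro y hy
        simp
        intro hz
        exact h0 (hz ▸ hy)
      rw [this]
      exact hperm
    · have hns : ∀ x ∈ s, 0 ≤ x := fun x hx => hnonneg x (hperm.mem_iff.mp hx)
      rw [hton, drop_count_sorted s hpair hns]
      exact hperm.filter _
  have hdpair : (s.drop n.toNat).Pairwise (· ≤ ·) := hpair.sublist (List.drop_sublist _ _)
  rw [altLoop_eq]
  have hempty : ∀ x ∈ nzl l, x ∉ PySem.Set.empty := by
    intro x _ hx
    cases hx
  match htt : s.drop n.toNat with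
  | [] =>
    have hnl : nzl l = [] := List.Perm.eq_nil (htt ▸ hdperm).symm
    rw [hnl]
    simp only [List.nodup_nil, true_and, List.foldl_nil]
    rw [if_pos (fun x hx => (List.not_mem_nil (hx : x ∈ ([] : List Int))).elim)]
    simp [chk, altTerm, not_lt.mpr hn]
  | a :: r =>
    rw [htt] at hdperm hdpair
    rw [chk_sorted r a n 0 hdpair]
    obtain ⟨c, d, hcd⟩ := List.exists_cons_of_ne_nil (l := nzl l)
      (fun hnil => by rw [hnil] at hdperm; exact (List.cons_ne_nil a r) hdperm.eq_nil)
    rw [hcd] at hdperm hempty ⊢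
    have hndiff : (a :: r).Nodup ↔ (c :: d).Nodup := hdperm.nodup_iff
    by_cases hnd : (a :: r).Nodup
    · rw [if_pos hnd, if_pos ⟨hndiff.mp hnd, hempty⟩]
      -- min
      have hminmem : a ∈ c :: d := hdperm.mem_iff.mp List.mem_cons_self
      have hminle : ∀ y ∈ c :: d, a ≤ y := by
        intro y hy
        have hy' : y ∈ a :: r := hdperm.mem_iff.mpr hy
        rcases List.mem_cons.mp hy' with h | h
        · omega
        · exact (List.pairwise_cons.mp hdpair).1 y h
      have hmin : d.foldl min c = a :=
        le_antisymm (foldl_min_le c d a hminmem) (hminle _ (foldl_min_mem c d))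
      -- max
      have hmaxmem : (a :: r).getLastD 0 ∈ c :: d := by
        apply hdperm.mem_iff.mp
        have : (a :: r).getLastD 0 = (a :: r).getLast (List.cons_ne_nil a r) := by
          simp [List.getLastD_eq_getLast?, List.getLast?_eq_some_getLast]
        rw [this]
        exact List.getLast_mem _
      have hmaxge : ∀ y ∈ c :: d, y ≤ (a :: r).getLastD 0 := by
        intro y hy
        exact pairwise_le_getLastD r a hdpair y (hdperm.mem_iff.mpr hy)
      have hmax : d.foldl max c = (a :: r).getLastD 0 :=
        le_antisymm (hmaxge _ (foldl_max_mem c d)) (foldl_max_ge c d _ hmaxmem)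
      have hlen : ((PySem.Set.ofList (c :: d)).length : Int) = (c :: d).length := by
        rw [ofList_length_nodup _ (hndiff.mp hnd)]
      have hlen2 : ((c :: d).length : Int) = ((a :: r).length : Int) := by
        exact_mod_cast hdperm.length_eq.symm
      rw [PySem.Set.ofList_eq_foldl] at hlen
      simp only [List.foldl_cons] at hlen ⊢
      rw [show (PySem.Set.empty : PySem.Set Int) = ([] : List Int) from rfl]
      rw [show omin none c = some c from rfl, show omax none c = some c from rfl,
          foldl_omin_some, foldl_omax_some]
      simp only [altTerm, hmin, hmax]
      have hz : n = (l.count 0 : Int) := by rw [hndef, hcnt]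
      rw [decide_eq_decide]
      simp only [List.length_cons] at hlen hlen2 ⊢
      push_cast at hlen hlen2 ⊢
      omega
    · rw [if_neg hnd, if_neg]
      rintro ⟨hnd', -⟩
      exact hnd (hndiff.mpr hnd')

-- ===== VERDICT (by name: the statement is the Claim_ definition above) =====
theorem solution_spec : Claim_equal_solution := by
  intro l _ hpre
  unfold Spec_solution
  exact solution_eq l hpre
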